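-- pv_equiv track=rewrite | github.com/edgeboyo/dns-deployment | dns/operators.py | prep_regex
-- ===== SOURCE A (Python) =====
-- def prep_regex(domainName):
--     regex = ""
--
--     for c in domainName:
--         if c == "*":
--             c = "." + c
--
--         if c == ".":
--             c = "\\" + c
--
--         regex += c
--
--     return regex
-- ===== SOURCE B (Python) =====
-- def prep_regex(domainName):
--     return domainName.replace(".", "\\.").replace("*", ".*")
-- ===== Notes on version B (the rewrite author's own statement) =====
-- stated objective: idiomatic
-- what changed: Replaced the per-character accumulating loop with two whole-string replace passes (dot-escape first, then star-expansion), the way a Python developer would write this substitution.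
import Mathlib
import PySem

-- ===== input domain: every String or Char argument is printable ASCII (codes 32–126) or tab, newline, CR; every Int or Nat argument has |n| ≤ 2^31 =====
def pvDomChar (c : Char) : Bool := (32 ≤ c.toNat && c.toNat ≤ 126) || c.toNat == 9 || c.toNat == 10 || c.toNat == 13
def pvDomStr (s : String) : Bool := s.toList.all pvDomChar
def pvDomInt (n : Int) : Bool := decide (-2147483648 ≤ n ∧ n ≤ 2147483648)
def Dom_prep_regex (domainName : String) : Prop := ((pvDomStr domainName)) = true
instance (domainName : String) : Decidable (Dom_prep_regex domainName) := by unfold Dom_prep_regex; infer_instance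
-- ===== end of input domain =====

-- B replaces A's per-character accumulating loop with two whole-string substitution passes (dot-escape first, then star-expansion).

-- ===== PORT A =====
-- per-character: c := "." + c if c == "*"; then c := "\" + c if c == "."; regex += c
def prep_regex_step (c : Char) : String :=
  let s := String.singleton c
  let s := if s = "*" then "." ++ s else s
  let s := if s = "." then "\\" ++ s else s
  s

def prep_regex (domainName : String) : String :=
  domainName.toList.foldl (fun regex c => regex ++ prep_regex_step c) ""

-- ===== PORT B =====
def prep_regex_alt (domainName : String) : String :=
  PySem.Str.replace (PySem.Str.replace domainName "." "\\.") "*" ".*"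

-- ===== PRECONDITION & SPEC =====
def Spec_prep_regex (domainName : String) (out : String) : Prop := out = prep_regex_alt domainName
instance (domainName : String) (out : String) : Decidable (Spec_prep_regex domainName out) := by unfold Spec_prep_regex; infer_instance

-- ===== CLAIM (what is proved, stated in full; the proofs are below) =====
def Claim_equal_prep_regex : Prop := ∀ (domainName : String), Dom_prep_regex domainName → Spec_prep_regex domainName (prep_regex domainName)

-- ===== LEMMAS AND PROOFS =====

-- single-char replace = flatMap of a per-character substitution
theorem replace_go_single (a : Char) (r : List Char) :
    ∀ (fuel : Nat) (l acc : List Char), l.length ≤ fuel →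
      PySem.Chars.replace.go [a] r fuel l acc
        = acc.reverse ++ l.flatMap (fun c => if c = a then r else [c]) := by
  intro fuel
  induction fuel with
  | zero =>
    intro l acc h
    have : l = [] := List.eq_nil_of_length_eq_zero (Nat.le_zero.mp h)
    subst this
    simp [PySem.Chars.replace.go]
  | succ n ih =>
    intro l acc h
    cases l with
    | nil => simp [PySem.Chars.replace.go]
    | cons c t =>
      simp only [PySem.Chars.replace.go]
      by_cases hca : c = a
      · subst hca
        have hp : List.isPrefixOf [c] (c :: t) = true := by
          simp [List.isPrefixOf]
        rw [if_pos hp]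
        simp only [List.length_cons, List.length_nil, List.drop_succ_cons, List.drop_zero]
        rw [ih t (r.reverse ++ acc) (by simpa using Nat.le_of_succ_le_succ h)]
        simp
      · have hp : List.isPrefixOf [a] (c :: t) = false := by
          simp [List.isPrefixOf]
          exact fun hc => absurd hc.symm hca
        rw [if_neg (by simp [hp])]
        rw [ih t (c :: acc) (by simpa using Nat.le_of_succ_le_succ h)]
        simp [hca]

theorem replace_single (a : Char) (r cs : List Char) :
    PySem.Chars.replace cs [a] r = cs.flatMap (fun c => if c = a then r else [c]) := by
  simp only [PySem.Chars.replace, List.isEmpty]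
  rw [replace_go_single a r cs.length cs [] (le_refl _)]
  simp

theorem alt_toList (d : String) :
    (prep_regex_alt d).toList
      = d.toList.flatMap (fun c => (prep_regex_step c).toList) := by
  unfold prep_regex_alt
  rw [PySem.Str.toList_replace, PySem.Str.toList_replace]
  have h1 : ("." : String).toList = ['.'] := rfl
  have h2 : ("\\." : String).toList = ['\\', '.'] := rfl
  have h3 : ("*" : String).toList = ['*'] := rfl
  have h4 : (".*" : String).toList = ['.', '*'] := rfl
  rw [h1, h2, h3, h4, replace_single, replace_single, List.flatMap_assoc]
  apply List.flatMap_congr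
  intro c _
  by_cases hd : c = '.'
  · subst hd; rfl
  · by_cases hs : c = '*'
    · subst hs; rfl
    · simp only [if_neg hd, List.flatMap_cons, List.flatMap_nil, List.append_nil,
        if_neg hs, prep_regex_step]
      have hstar : "".push c ≠ "*" := fun h => hs (by simpa using congrArg String.toList h)
      have hdot : "".push c ≠ "." := fun h => hd (by simpa using congrArg String.toList h)
      simp only [prep_regex_step, String.singleton, if_neg hstar, if_neg hdot]
      simp

theorem a_toList (d : String) :
    ∀ (l : List Char) (acc : String),
      (l.foldl (fun regex c => regex ++ prep_regex_step c) acc).toList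
        = acc.toList ++ l.flatMap (fun c => (prep_regex_step c).toList) := by
  intro l
  induction l with
  | nil => intro acc; simp
  | cons c t ih =>
    intro acc
    simp only [List.foldl_cons, List.flatMap_cons]
    rw [ih]
    simp

theorem prep_regex_spec : Claim_equal_prep_regex := by
  intro d _
  unfold Spec_prep_regex
  apply String.toList_inj.mp
  have hA := a_toList d d.toList ""
  have hB := alt_toList d
  rw [prep_regex, hA, hB]
  rfl

-- ===== VERDICT (by name: the statement is the Claim_ definition above) =====
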